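-- pv_equiv track=rewrite | github.com/Anthony10700/pyvoicetochat | core/shortcut_listener.py | _format_shortcut_for_pynput
-- ===== SOURCE A (Python) =====
-- def _format_shortcut_for_pynput(shortcut_str: str) -> str:
--     """
--     Formate une chaîne comme "Ctrl+Alt+V" en "<ctrl>+<alt>+v" pour pynput.
--     Les touches de modification sont entourées de <>, mais pas les caractères simples.
--     """
--     parts = shortcut_str.lower().split('+')
--     formatted_parts = []
--     for part in parts:
--         # Les touches de modification ou spéciales (ctrl, alt, f1...) ont une longueur > 1.
--         # Les caractères simples (v, b...) ont une longueur de 1.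
--         if len(part) > 1:
--             formatted_parts.append(f"<{part}>")
--         else:
--             formatted_parts.append(part)
--     return '+'.join(formatted_parts)
-- ===== SOURCE B (Python) =====
-- def _format_shortcut_for_pynput(shortcut_str: str) -> str:
--     """Single left-to-right scan: accumulate each run of non-'+' characters and
--     emit it wrapped in <> when longer than one char, copying '+' delimiters as-is
--     (no split/list-of-parts/join)."""
--     out = []
--     run = []
--     for ch in shortcut_str.lower():
--         if ch == '+':
--             if len(run) > 1:
--                 out.append('<')
--                 out.extend(run)
--                 out.append('>')
--             else:
--                 out.extend(run)
--             out.append('+')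
--             run = []
--         else:
--             run.append(ch)
--     if len(run) > 1:
--         out.append('<')
--         out.extend(run)
--         out.append('>')
--     else:
--         out.extend(run)
--     return ''.join(out)
-- ===== Notes on version B (the rewrite author's own statement) =====
-- stated objective: alternative
-- what changed: Replaced split('+')/list-of-parts/'+'.join with a single character-by-character scan that accumulates runs of non-'+' characters and emits each run (wrapped in <> when longer than one character) in place, copying '+' delimiters as encountered.
import Mathlib
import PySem

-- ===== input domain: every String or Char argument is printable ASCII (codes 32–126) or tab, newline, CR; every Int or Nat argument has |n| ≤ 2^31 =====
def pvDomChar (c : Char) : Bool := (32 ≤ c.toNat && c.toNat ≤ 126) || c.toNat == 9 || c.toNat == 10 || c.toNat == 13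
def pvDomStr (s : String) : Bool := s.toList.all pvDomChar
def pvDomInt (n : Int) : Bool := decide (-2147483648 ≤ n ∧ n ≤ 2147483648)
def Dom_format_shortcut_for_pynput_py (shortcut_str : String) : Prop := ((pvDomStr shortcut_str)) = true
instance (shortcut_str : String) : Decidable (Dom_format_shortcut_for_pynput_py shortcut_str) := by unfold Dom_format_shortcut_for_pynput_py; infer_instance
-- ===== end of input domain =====

-- B replaces split('+')/parts-list/'+'.join with one left-to-right scan over the
-- characters that wraps each maximal run of non-'+' characters in place (objective: alternative).
-- ===== PORT A =====
def format_shortcut_for_pynput_py (shortcut_str : String) : String :=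
  let parts := PySem.Chars.splitOn (PySem.Chars.lower shortcut_str.toList) ['+']
  let formatted_parts := parts.foldl
    (fun acc part => acc ++ [if 1 < part.length then '<' :: (part ++ ['>']) else part]) []
  String.ofList (PySem.Chars.join ['+'] formatted_parts)

-- ===== PORT B =====
-- the repeated "if len(run) > 1: … else: …" emission block of Source B
def pvWrap (run : List Char) : List Char :=
  if 1 < run.length then '<' :: (run ++ ['>']) else run

-- the for-loop of Source B: `run` is the accumulated run, output is built left to right
def pvScan (run : List Char) : List Char → List Char
  | [] => pvWrap run
  | c :: rest => if c = '+' then pvWrap run ++ '+' :: pvScan [] rest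
                 else pvScan (run ++ [c]) rest

def format_shortcut_for_pynput_py_alt (shortcut_str : String) : String :=
  String.ofList (pvScan [] (PySem.Chars.lower shortcut_str.toList))

-- ===== PRECONDITION & SPEC =====
def Spec_format_shortcut_for_pynput_py (shortcut_str : String) (out : String) : Prop := out = format_shortcut_for_pynput_py_alt shortcut_str
instance (shortcut_str : String) (out : String) : Decidable (Spec_format_shortcut_for_pynput_py shortcut_str out) := by unfold Spec_format_shortcut_for_pynput_py; infer_instance

-- ===== CLAIM (what is proved, stated in full; the proofs are below) =====
def Claim_equal_format_shortcut_for_pynput_py : Prop := ∀ (shortcut_str : String), Dom_format_shortcut_for_pynput_py shortcut_str → Spec_format_shortcut_for_pynput_py shortcut_str (format_shortcut_for_pynput_py shortcut_str)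

-- ===== LEMMAS AND PROOFS =====
-- reference splitter: split on '+' as a simple structural recursion
def pvMySplit : List Char → List (List Char)
  | [] => [[]]
  | c :: rest =>
    if c = '+' then [] :: pvMySplit rest
    else match pvMySplit rest with
      | p :: ps => (c :: p) :: ps
      | [] => [[c]]

-- prepend x to the first piece
def pvConsHead (x : List Char) : List (List Char) → List (List Char)
  | [] => [x]
  | p :: ps => (x ++ p) :: ps

theorem pvMySplit_ne_nil (l : List Char) : pvMySplit l ≠ [] := by
  cases l with
  | nil => simp [pvMySplit]
  | cons c rest =>
    simp only [pvMySplit]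
    split
    · simp
    · cases h : pvMySplit rest <;> simp

theorem pvConsHead_nil (xs : List (List Char)) (h : xs ≠ []) : pvConsHead [] xs = xs := by
  cases xs with
  | nil => exact absurd rfl h
  | cons p ps => simp [pvConsHead]

theorem pvGo_eq (l : List Char) : ∀ (fuel : Nat) (cur : List Char) (acc : List (List Char)),
    l.length < fuel →
    PySem.Chars.splitOn.go ['+'] fuel l cur acc
      = acc.reverse ++ pvConsHead cur.reverse (pvMySplit l) := by
  induction l with
  | nil =>
    intro fuel cur acc hf
    cases fuel with
    | zero => omega
    | succ f => simp [PySem.Chars.splitOn.go, pvMySplit, pvConsHead]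
  | cons c rest ih =>
    intro fuel cur acc hf
    cases fuel with
    | zero => omega
    | succ f =>
      by_cases hc : c = '+'
      · subst hc
        have hpre : (['+'] : List Char).isPrefixOf ('+' :: rest) = true := by
          simp [List.isPrefixOf]
        rw [PySem.Chars.splitOn.go]
        simp only [hpre, if_true]
        rw [show List.drop (['+'] : List Char).length ('+' :: rest) = rest by simp,
            ih f [] (cur.reverse :: acc) (by simp at hf; omega)]
        rw [show ([] : List Char).reverse = [] from rfl,
            pvConsHead_nil _ (pvMySplit_ne_nil rest)]
        simp [pvMySplit, pvConsHead]
      · have hpre : (['+'] : List Char).isPrefixOf (c :: rest) = false := by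
          simp [List.isPrefixOf]
          exact Ne.symm hc
        rw [PySem.Chars.splitOn.go]
        simp only [hpre, Bool.false_eq_true, if_false]
        rw [ih f (c :: cur) acc (by simp at hf; omega)]
        have : pvMySplit (c :: rest) = pvConsHead [c] (pvMySplit rest) := by
          simp only [pvMySplit, hc, if_false]
          cases h : pvMySplit rest with
          | nil => exact absurd h (pvMySplit_ne_nil rest)
          | cons p ps => simp [pvConsHead]
        rw [this]
        cases h : pvMySplit rest with
        | nil => exact absurd h (pvMySplit_ne_nil rest)
        | cons p ps => simp [pvConsHead]

theorem pvSplitOn_eq (l : List Char) : PySem.Chars.splitOn l ['+'] = pvMySplit l := by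
  rw [PySem.Chars.splitOn, pvGo_eq l (l.length + 1) [] [] (Nat.lt_succ_self _)]
  simp [pvConsHead_nil _ (pvMySplit_ne_nil l)]

theorem pvScan_eq (l : List Char) : ∀ (run : List Char),
    pvScan run l = PySem.Chars.join ['+'] ((pvConsHead run (pvMySplit l)).map pvWrap) := by
  induction l with
  | nil =>
    intro run
    simp [pvScan, pvMySplit, pvConsHead, PySem.Chars.join, List.intercalate]
  | cons c rest ih =>
    intro run
    by_cases hc : c = '+'
    · subst hc
      simp only [pvScan, if_true, pvMySplit, pvConsHead, List.append_nil]
      rw [ih [], pvConsHead_nil _ (pvMySplit_ne_nil rest)]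
      cases h : pvMySplit rest with
      | nil => exact absurd h (pvMySplit_ne_nil rest)
      | cons p ps =>
        simp [PySem.Chars.join, List.intercalate]
    · simp only [pvScan, hc, if_false]
      rw [ih (run ++ [c])]
      have : pvConsHead run (pvMySplit (c :: rest)) = pvConsHead (run ++ [c]) (pvMySplit rest) := by
        simp only [pvMySplit, hc, if_false]
        cases h : pvMySplit rest with
        | nil => exact absurd h (pvMySplit_ne_nil rest)
        | cons p ps => simp [pvConsHead]
      rw [this]

-- ===== VERDICT (by name: the statement is the Claim_ definition above) =====
theorem format_shortcut_for_pynput_py_spec : Claim_equal_format_shortcut_for_pynput_py := by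
  intro s _
  unfold Spec_format_shortcut_for_pynput_py
  simp only [format_shortcut_for_pynput_py, format_shortcut_for_pynput_py_alt]
  rw [pvScan_eq, pvConsHead_nil _ (pvMySplit_ne_nil _), ← pvSplitOn_eq,
      PySem.List.foldl_append_singleton_eq_map]
  rfl
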